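-- pv_equiv track=rewrite | github.com/H-Cong/LeetCode | 205_IsomorphicStrings/205_IsomorphicStrings_1.py | helper
-- ===== SOURCE A (Python) =====
-- def helper(s):
--     temp = {}
--     i = 0
--     l = []
--     for c in s:
--         if c not in temp:
--             temp[c] = i
--             l.append(i)
--         else:
--             l.append(temp[c])
--         i += 1
--
--     return l
-- ===== SOURCE B (Python) =====
-- def helper(s):
--     out = [0] * len(s)
--     for c in set(s):
--         first = s.index(c)
--         out = [first if d == c else v for v, d in zip(out, s)]
--     return out
-- ===== Notes on version B (the rewrite author's own statement) =====
-- stated objective: alternative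
-- what changed: Instead of one indexed pass that records first occurrences in a dict as it goes, B loops over the DISTINCT characters of s and, for each, computes its first index once and fills every position holding that character in a preallocated output, a per-character fill rather than a per-position scan.
import Mathlib
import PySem

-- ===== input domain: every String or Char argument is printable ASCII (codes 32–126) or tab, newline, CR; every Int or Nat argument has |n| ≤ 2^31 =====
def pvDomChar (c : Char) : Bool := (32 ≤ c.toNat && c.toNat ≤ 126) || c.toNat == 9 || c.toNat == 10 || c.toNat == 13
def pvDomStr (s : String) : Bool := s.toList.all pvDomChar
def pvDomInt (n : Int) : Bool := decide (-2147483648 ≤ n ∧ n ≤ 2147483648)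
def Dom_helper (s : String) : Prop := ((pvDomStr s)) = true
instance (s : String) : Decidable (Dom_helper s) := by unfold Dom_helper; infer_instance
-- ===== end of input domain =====

-- B replaces A's single indexed pass (dict of first occurrences, appended per position) by a
-- per-character fill: loop over the distinct characters, fill every position of each with its
-- first index; genuinely different traversal, same return value (objective: alternative).

-- ===== PORT A =====
-- one loop step: 'if c not in temp: temp[c]=i; l.append(i) else: l.append(temp[c]); i += 1'
def helperStep (st : PySem.Dict Char Int × Int × List Int) (c : Char) :
    PySem.Dict Char Int × Int × List Int :=
  if st.1.contains c = false then (st.1.insert c st.2.1, st.2.1 + 1, st.2.2 ++ [st.2.1])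
  else (st.1, st.2.1 + 1, st.2.2 ++ [st.1.getD c 0])

def helper (s : String) : List Int :=
  (s.toList.foldl helperStep (PySem.Dict.empty, 0, [])).2.2

-- ===== PORT B =====
-- one outer-loop step: 'first = s.index(c); out = [first if d == c else v for v, d in zip(out, s)]'
def helperAltStep (cs : List Char) (out : List Int) (c : Char) : List Int :=
  let first : Int := (((PySem.List.index? cs c).getD 0 : Nat) : Int)
  (out.zip cs).map (fun p => if p.2 = c then first else p.1)

-- the fold consumes set(s); the result is order-independent (proved below), so this is exact
def helper_alt (s : String) : List Int :=
  (PySem.Set.ofList s.toList).foldl (helperAltStep s.toList) (List.replicate s.toList.length 0)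

-- ===== PRECONDITION & SPEC =====
def Spec_helper (s : String) (out : List Int) : Prop := out = helper_alt s
instance (s : String) (out : List Int) : Decidable (Spec_helper s out) := by unfold Spec_helper; infer_instance

-- ===== CLAIM (what is proved, stated in full; the proofs are below) =====
def Claim_equal_helper : Prop := ∀ (s : String), Dom_helper s → Spec_helper s (helper s)

-- ===== LEMMAS AND PROOFS =====

-- the common characterisation: position j holds the first-occurrence index of cs[j]
def firstIdx (cs : List Char) (c : Char) : Int :=
  (((PySem.List.index? cs c).getD 0 : Nat) : Int)

-- A-side loop invariant: with s = p ++ r processed up to p, the dict records exactly the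
-- first-occurrence indices within p, the counter is p.length, and the remaining
-- iterations append the first-occurrence-in-s index of each char of r
lemma helper_loop (s : List Char) (r p : List Char) (d : PySem.Dict Char Int) (l : List Int)
    (hs : s = p ++ r)
    (hd : ∀ x, d.get? x = (PySem.List.index? p x).map (fun n => (n : Int))) :
    (r.foldl helperStep (d, (p.length : Int), l)).2.2
      = l ++ r.map (firstIdx s) := by
  induction r generalizing p d l with
  | nil => simp
  | cons c r' ih =>
    have hsc : s = (p ++ [c]) ++ r' := by simpa using hs
    by_cases hc : c ∈ p
    · obtain ⟨n, hn⟩ : ∃ n, PySem.List.index? p c = some n :=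
        Option.isSome_iff_exists.mp ((PySem.List.index?_isSome_iff p c).mpr hc)
      have hget : d.get? c = some (n : Int) := by rw [hd c, hn]; rfl
      have hcontains : d.contains c = true := by
        rw [PySem.Dict.contains_eq_isSome_get?, hget]; rfl
      have hsind : PySem.List.index? s c = some n := by
        rw [hs, PySem.List.index?_append_of_mem _ hc, hn]
      have hstep : helperStep (d, (p.length : Int), l) c
          = (d, (p.length : Int) + 1, l ++ [(n : Int)]) := by
        simp [helperStep, hcontains, PySem.Dict.getD_eq_get?_getD, hget]
      rw [List.foldl_cons, hstep]
      have hd' : ∀ x, d.get? x = (PySem.List.index? (p ++ [c]) x).map (fun n => (n : Int)) := by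
        intro x
        by_cases hx : x ∈ p
        · rw [PySem.List.index?_append_of_mem _ hx]; exact hd x
        · have hxc : x ≠ c := fun h => hx (h ▸ hc)
          have : PySem.List.index? (p ++ [c]) x = none :=
            (PySem.List.index?_eq_none_iff _ x).mpr (by simp [hx, hxc])
          rw [this, hd x, (PySem.List.index?_eq_none_iff p x).mpr hx]
      have := ih (p ++ [c]) d (l ++ [(n : Int)]) hsc hd'
      simp only [List.length_append, List.length_cons, List.length_nil] at this
      push_cast at this ⊢
      rw [this]
      simp only [PySem.List.index?_eq_idxOf?] at hsind
      simp [firstIdx, hsind]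
    · have hget : d.get? c = none := by
        rw [hd c, (PySem.List.index?_eq_none_iff p c).mpr hc]; rfl
      have hcontains : d.contains c = false := by
        rw [PySem.Dict.contains_eq_isSome_get?, hget]; rfl
      have hsind : PySem.List.index? s c = some p.length := by
        rw [hs, PySem.List.index?_eq_some_iff]
        exact ⟨p, r', rfl, rfl, hc⟩
      have hstep : helperStep (d, (p.length : Int), l) c
          = (d.insert c (p.length : Int), (p.length : Int) + 1, l ++ [(p.length : Int)]) := by
        simp [helperStep, hcontains]
      rw [List.foldl_cons, hstep]
      have hd' : ∀ x, (d.insert c (p.length : Int)).get? x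
          = (PySem.List.index? (p ++ [c]) x).map (fun n => (n : Int)) := by
        intro x
        by_cases hxc : x = c
        · rw [hxc, PySem.Dict.get?_insert_self,
            PySem.List.index?_append_singleton_self p c hc]; rfl
        · rw [PySem.Dict.get?_insert_of_ne d ((p.length : Int)) hxc, hd x]
          by_cases hx : x ∈ p
          · rw [PySem.List.index?_append_of_mem _ hx]
          · rw [(PySem.List.index?_eq_none_iff p x).mpr hx,
              (PySem.List.index?_eq_none_iff _ x).mpr (by simp [hx, hxc] : x ∉ p ++ [c])]
      have := ih (p ++ [c]) (d.insert c (p.length : Int)) (l ++ [(p.length : Int)]) hsc hd'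
      simp only [List.length_append, List.length_cons, List.length_nil] at this
      push_cast at this ⊢
      rw [this]
      simp only [PySem.List.index?_eq_idxOf?] at hsind
      simp [firstIdx, hsind]

lemma helper_eq_map (s : String) : helper s = s.toList.map (firstIdx s.toList) := by
  have h := helper_loop s.toList s.toList [] PySem.Dict.empty [] (by simp)
    (by intro x; simp [PySem.Dict.get?_empty])
  simpa [helper] using h

-- one B-step, pointwise: length preserved and position j updated iff cs[j] = c
lemma helperAltStep_length (cs : List Char) (out : List Int) (c : Char)
    (h : out.length = cs.length) : (helperAltStep cs out c).length = cs.length := by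
  simp [helperAltStep, h]

lemma helperAltStep_getElem (cs : List Char) (out : List Int) (c : Char)
    (h : out.length = cs.length) (j : Nat) (hj : j < cs.length)
    (hj' : j < (helperAltStep cs out c).length) :
    (helperAltStep cs out c)[j] = if cs[j] = c then firstIdx cs c else out[j]'(h ▸ hj) := by
  simp [helperAltStep, firstIdx, h, hj]

-- B-side fold invariant: after processing the characters of D, position j holds the
-- first-occurrence index of cs[j] if cs[j] ∈ D, and its initial value otherwise
lemma helper_alt_loop (cs : List Char) (D : List Char) (init : List Int)
    (hlen : init.length = cs.length) :
    (D.foldl (helperAltStep cs) init).length = cs.length ∧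
    ∀ j (hj : j < cs.length) (hj' : j < (D.foldl (helperAltStep cs) init).length),
      (D.foldl (helperAltStep cs) init)[j]
        = if cs[j] ∈ D then firstIdx cs cs[j] else init[j]'(hlen ▸ hj) := by
  induction D generalizing init with
  | nil => exact ⟨hlen, by intro j hj hj'; simp⟩
  | cons c D' ih =>
    have h1 := helperAltStep_length cs init c hlen
    obtain ⟨hl, hv⟩ := ih (helperAltStep cs init c) h1
    refine ⟨by simpa using hl, ?_⟩
    intro j hj hj'
    simp only [List.foldl_cons] at hj' ⊢
    rw [hv j hj hj', helperAltStep_getElem cs init c hlen j hj (h1 ▸ hj)]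
    by_cases hD : cs[j] ∈ D'
    · simp [hD]
    · by_cases hc : cs[j] = c
      · simp [hD, hc]
      · simp [hD, hc]

lemma helper_alt_eq_map (s : String) : helper_alt s = s.toList.map (firstIdx s.toList) := by
  obtain ⟨hl, hv⟩ := helper_alt_loop s.toList (PySem.Set.ofList s.toList)
    (List.replicate s.toList.length 0) (by simp)
  apply List.ext_getElem
  · simpa [helper_alt] using hl
  · intro j hj hj'
    have hjc : j < s.toList.length := by simpa using hj'
    have := hv j hjc (by simpa [helper_alt] using hj)
    simp only [helper_alt]
    rw [this]
    simp [PySem.Set.mem_ofList]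

-- ===== VERDICT (by name: the statement is the Claim_ definition above) =====
theorem helper_spec : Claim_equal_helper := by
  intro s _
  unfold Spec_helper
  rw [helper_eq_map, helper_alt_eq_map]
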